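-- pv_equiv track=rewrite | github.com/manavthakkar/consistify | helpful-scripts/5_read_and_plot_year_from_database.py | habit_days_count_year
-- ===== SOURCE A (Python) =====
-- def habit_days_count_year(data, year, habit_name):
--     """Calculate the number of days a specific habit was performed in each month for a given year.
--
--     Args:
--         data (dict): A dictionary containing habit data organized by year, month, and habit name.
--         year (str): The year for which to calculate the habit days.
--         habit_name (str): The name of the habit to analyze.
--
--     Returns:
--         list: A list of integers where each element corresponds to the number of days
--               the habit was performed in the respective month. The length of the list
--               is based on the availability of data in the dictionary, with missing
--               months treated as 0.
--
--     Example: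
--         Input:
--             year = "2023"
--             habit_name = "Workout"
--         Output:
--             [23, 25, 18, 14, 25, ...]
--
--     """
--     # Define the months in order
--     months_order = [
--         "January", "February", "March", "April",
--         "May", "June", "July", "August",
--         "September", "October", "November", "December",
--     ]
--
--     # Get the data for the given year
--     year_data = data.get(year, {})
--
--     # Initialize the result array with 0 for each month
--     result = [0] * 12
--
--     for month_index, month in enumerate(months_order):
--         # Check if the month exists in the data
--         if month in year_data and habit_name in year_data[month]:
--             # Count the number of days the habit was performed
--             result[month_index] = sum(year_data[month][habit_name])
--
--     # Remove trailing zeros to match the length of available data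
--     # while result and result[-1] == 0:
--     #     result.pop()
--
--     return result
-- ===== SOURCE B (Python) =====
-- MONTHS = [
--     "January", "February", "March", "April",
--     "May", "June", "July", "August",
--     "September", "October", "November", "December",
-- ]
--
-- MONTH_INDEX = {m: i for i, m in enumerate(MONTHS)}
--
--
-- def habit_days_count_year(data, year, habit_name):
--     """Data-driven pass: iterate the stored months (latest entry first) instead of
--     scanning the fixed 12-month schema for each slot."""
--     result = [0] * 12
--     year_data = data.get(year, {})
--     for month, habits in reversed(list(year_data.items())):
--         i = MONTH_INDEX.get(month)
--         if i is not None: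
--             result[i] = sum(habits.get(habit_name, []))
--     return result
-- ===== Notes on version B (the rewrite author's own statement) =====
-- stated objective: alternative
-- what changed: B replaces A's schema-driven scan (12 fixed months, each doing membership tests and lookups into the stored dict) with a single data-driven pass over the stored months, using a precomputed month->index table and writing sums into a 12-slot array.
import Mathlib
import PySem

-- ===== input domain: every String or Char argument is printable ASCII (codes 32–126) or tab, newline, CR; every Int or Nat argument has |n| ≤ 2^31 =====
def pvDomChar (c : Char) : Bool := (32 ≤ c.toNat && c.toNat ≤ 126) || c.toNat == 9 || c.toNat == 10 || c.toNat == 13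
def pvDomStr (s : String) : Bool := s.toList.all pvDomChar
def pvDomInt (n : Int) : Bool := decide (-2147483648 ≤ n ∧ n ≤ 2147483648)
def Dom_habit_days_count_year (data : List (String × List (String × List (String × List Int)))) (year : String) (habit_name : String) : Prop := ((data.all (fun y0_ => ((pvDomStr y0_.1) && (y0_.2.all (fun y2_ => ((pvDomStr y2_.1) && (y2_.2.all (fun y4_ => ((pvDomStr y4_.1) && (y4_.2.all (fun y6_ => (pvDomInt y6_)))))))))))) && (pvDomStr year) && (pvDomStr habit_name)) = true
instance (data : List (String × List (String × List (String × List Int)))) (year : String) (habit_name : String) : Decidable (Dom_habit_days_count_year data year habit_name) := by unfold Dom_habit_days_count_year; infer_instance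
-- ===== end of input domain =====

-- B replaces A's fixed 12-month schema scan by one data-driven pass over the stored
-- months with a precomputed month→index table (alternative decomposition, same result).

-- ===== PORT A =====
def pvMonths : List String :=
  ["January", "February", "March", "April",
   "May", "June", "July", "August",
   "September", "October", "November", "December"]

def habit_days_count_year (data : List (String × List (String × List (String × List Int)))) (year : String) (habit_name : String) : List Int :=
  -- year_data = data.get(year, {})
  let year_data := (PySem.Dict.mk data).getD year []
  -- result = [0]*12; for month_index, month in enumerate(months_order): …
  (PySem.List.enumerate pvMonths 0).foldl
    (fun result p =>
      if (PySem.Dict.mk year_data).contains p.2 &&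
         (PySem.Dict.mk ((PySem.Dict.mk year_data).getD p.2 [])).contains habit_name then
        -- result[month_index] = sum(year_data[month][habit_name]); the index is 0..11, so .toNat is exact,
        -- and the getD defaults are unreachable under the guards
        result.set p.1.toNat (((PySem.Dict.mk ((PySem.Dict.mk year_data).getD p.2 [])).getD habit_name []).sum)
      else result)
    (List.replicate 12 0)

-- ===== PORT B =====
-- MONTH_INDEX = {m: i for i, m in enumerate(MONTHS)}
def pvMonthIndex : PySem.Dict String Int :=
  (PySem.List.enumerate pvMonths 0).foldl (fun d p => d.insert p.2 p.1) PySem.Dict.empty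

def habit_days_count_year_alt (data : List (String × List (String × List (String × List Int)))) (year : String) (habit_name : String) : List Int :=
  -- year_data = data.get(year, {})
  let year_data := (PySem.Dict.mk data).getD year []
  -- for month, habits in reversed(list(year_data.items())): …
  year_data.reverse.foldl
    (fun result p =>
      match pvMonthIndex.get? p.1 with
      | some i =>
        -- result[i] = sum(habits.get(habit_name, [])); i is 0..11, so .toNat is exact
        result.set i.toNat (((PySem.Dict.mk p.2).getD habit_name []).sum)
      | none => result)
    (List.replicate 12 0)

-- ===== PRECONDITION & SPEC =====
def Spec_habit_days_count_year (data : List (String × List (String × List (String × List Int)))) (year : String) (habit_name : String) (out : List Int) : Prop := out = habit_days_count_year_alt data year habit_name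
instance (data : List (String × List (String × List (String × List Int)))) (year : String) (habit_name : String) (out : List Int) : Decidable (Spec_habit_days_count_year data year habit_name out) := by unfold Spec_habit_days_count_year; infer_instance

-- ===== CLAIM (what is proved, stated in full; the proofs are below) =====
def Claim_equal_habit_days_count_year : Prop := ∀ (data : List (String × List (String × List (String × List Int)))) (year : String) (habit_name : String), Dom_habit_days_count_year data year habit_name → Spec_habit_days_count_year data year habit_name (habit_days_count_year data year habit_name)

-- ===== LEMMAS AND PROOFS =====

-- the per-month value both programs compute from the stored year data
def pvG (habit_name : String) (l : List (String × List (String × List Int))) (m : String) : Int :=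
  match (PySem.Dict.mk l).get? m with
  | some hb => ((PySem.Dict.mk hb).getD habit_name []).sum
  | none => 0

-- evaluated form of the comprehension-built index table
set_option maxHeartbeats 1000000 in
lemma pvMonthIndex_eq : pvMonthIndex = PySem.Dict.mk
    [("January", 0), ("February", 1), ("March", 2), ("April", 3),
     ("May", 4), ("June", 5), ("July", 6), ("August", 7),
     ("September", 8), ("October", 9), ("November", 10), ("December", 11)] := by
  decide

set_option maxHeartbeats 1000000 in
lemma pvMonthIndex_some {s : String} {i : Int} (h : pvMonthIndex.get? s = some i) :
    0 ≤ i ∧ i.toNat < pvMonths.length ∧ pvMonths[i.toNat]? = some s := by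
  rw [pvMonthIndex_eq] at h
  simp only [PySem.Dict.get?_mk_cons, beq_iff_eq] at h
  split_ifs at h with h1 h2 h3 h4 h5 h6 h7 h8 h9 h10 h11 h12 <;>
    first
      | (cases h; subst_vars; decide)
      | (rw [show PySem.Dict.mk ([] : List (String × Int)) = PySem.Dict.empty from rfl] at h;
         simp at h)

lemma pvMonthIndex_none {s : String} (h : pvMonthIndex.get? s = none) :
    ∀ m ∈ pvMonths, m ≠ s := by
  intro m hm he
  subst he
  fin_cases hm <;> rw [pvMonthIndex_eq] at h <;> simp [PySem.Dict.get?_mk_cons] at h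

-- setting one slot of a mapped nodup list rewrites the function at that element
lemma set_map_nodup {α β : Type} [DecidableEq α] (ms : List α) (hnd : ms.Nodup)
    (f : α → β) (j : Nat) (hj : j < ms.length) (x : β) :
    (ms.map f).set j x = ms.map (fun m => if m = ms[j] then x else f m) := by
  apply List.ext_getElem (by simp)
  intro k hk hk'
  have hkm : k < ms.length := by simpa using hk'
  simp only [List.getElem_set, List.getElem_map]
  by_cases hkj : j = k
  · subst hkj; simp
  · have hne : ms[k] ≠ ms[j] := by
      intro e
      exact hkj (((List.Nodup.getElem_inj_iff hnd).mp e).symm)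
    simp [hkj, hne]

-- A's schema loop: setting each enumerated slot of the array equals a map over the schema
lemma foldA (c : String → Bool) (v : String → Int) :
    ∀ (ms : List String) (s : Nat) (pre r : List Int), pre.length = s → r.length = ms.length →
    (PySem.List.enumerate ms (s : Int)).foldl
      (fun result p => if c p.2 then result.set p.1.toNat (v p.2) else result) (pre ++ r)
    = pre ++ (ms.zip r).map (fun q => if c q.1 then v q.1 else q.2) := by
  intro ms
  induction ms with
  | nil =>
    intro s pre r _ hr
    simp [PySem.List.enumerate_nil, List.length_eq_zero_iff.mp hr]
  | cons m t ih =>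
    intro s pre r hpre hr
    cases r with
    | nil => simp at hr
    | cons x rt =>
      rw [PySem.List.enumerate_cons]
      simp only [List.foldl_cons]
      have hset : (if c m then (pre ++ x :: rt).set ((s : Int)).toNat (v m) else pre ++ x :: rt)
          = (pre ++ [if c m then v m else x]) ++ rt := by
        by_cases hc : c m <;>
          simp [hc, hpre.symm, List.set_append_right, List.append_assoc]
      rw [hset]
      have : ((s : Int) + 1) = ((s + 1 : Nat) : Int) := by push_cast; ring
      rw [this, ih (s + 1) (pre ++ [if c m then v m else x]) rt (by simp [hpre]) (by simpa using hr)]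
      simp

-- B's data pass, peeled from the right: the array maps each month to its first stored entry
lemma foldB (habit_name : String) :
    ∀ (l : List (String × List (String × List Int))),
    l.reverse.foldl
      (fun result p =>
        match pvMonthIndex.get? p.1 with
        | some i => result.set i.toNat (((PySem.Dict.mk p.2).getD habit_name []).sum)
        | none => result)
      (List.replicate 12 0)
    = pvMonths.map (pvG habit_name l) := by
  intro l
  induction l with
  | nil => rfl
  | cons p t ih =>
    obtain ⟨pk, pv⟩ := p
    rw [List.reverse_cons, List.foldl_append, ih]
    simp only [List.foldl_cons, List.foldl_nil]
    cases h : pvMonthIndex.get? pk with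
    | some i =>
      obtain ⟨hnn, hlt, hget⟩ := pvMonthIndex_some h
      have hms : pvMonths[i.toNat] = pk := by
        have h2 := List.getElem?_eq_getElem hlt
        rw [h2] at hget
        exact Option.some.inj hget
      show (pvMonths.map (pvG habit_name t)).set i.toNat (((PySem.Dict.mk pv).getD habit_name []).sum)
         = pvMonths.map (pvG habit_name ((pk, pv) :: t))
      rw [set_map_nodup pvMonths (by decide) _ i.toNat hlt]
      apply List.map_congr_left
      intro m _
      simp only [hms, pvG, PySem.Dict.get?_mk_cons, beq_iff_eq]
      by_cases he : m = pk
      · subst he; simp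
      · simp [he, Ne.symm he]
    | none =>
      show pvMonths.map (pvG habit_name t) = pvMonths.map (pvG habit_name ((pk, pv) :: t))
      apply List.map_congr_left
      intro m hm
      have hne : pk ≠ m := Ne.symm (pvMonthIndex_none h m hm)
      simp only [pvG, PySem.Dict.get?_mk_cons, beq_iff_eq]
      simp [hne]

-- the per-month values of the two programs agree
lemma pointwise (yd : List (String × List (String × List Int))) (habit_name m : String) :
    (if (PySem.Dict.mk yd).contains m &&
        (PySem.Dict.mk ((PySem.Dict.mk yd).getD m [])).contains habit_name then
      ((PySem.Dict.mk ((PySem.Dict.mk yd).getD m [])).getD habit_name []).sum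
     else 0)
    = pvG habit_name yd m := by
  unfold pvG
  cases hyd : (PySem.Dict.mk yd).get? m with
  | none =>
    have hc : (PySem.Dict.mk yd).contains m = false := by
      rw [PySem.Dict.contains_eq_isSome_get?, hyd]; rfl
    simp [hc]
  | some hb =>
    have hc : (PySem.Dict.mk yd).contains m = true := by
      rw [PySem.Dict.contains_eq_isSome_get?, hyd]; rfl
    have hgd : (PySem.Dict.mk yd).getD m [] = hb :=
      PySem.Dict.getD_of_get?_eq_some _ _ hyd
    rw [hgd, hc]
    cases hhb : (PySem.Dict.mk hb).get? habit_name with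
    | none =>
      have hc2 : (PySem.Dict.mk hb).contains habit_name = false := by
        rw [PySem.Dict.contains_eq_isSome_get?, hhb]; rfl
      have hge : (PySem.Dict.mk hb).getD habit_name [] = [] := by
        rw [PySem.Dict.getD_eq_get?_getD, hhb]; rfl
      simp [hc2, hge]
    | some v =>
      have hc2 : (PySem.Dict.mk hb).contains habit_name = true := by
        rw [PySem.Dict.contains_eq_isSome_get?, hhb]; rfl
      simp [hc2]

-- ===== VERDICT (by name: the statement is the Claim_ definition above) =====
theorem habit_days_count_year_spec : Claim_equal_habit_days_count_year := by
  intro data year habit_name _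
  unfold Spec_habit_days_count_year
  have hB := foldB habit_name ((PySem.Dict.mk data).getD year [])
  have hA := foldA
    (fun m => (PySem.Dict.mk ((PySem.Dict.mk data).getD year [])).contains m &&
      (PySem.Dict.mk ((PySem.Dict.mk ((PySem.Dict.mk data).getD year [])).getD m [])).contains habit_name)
    (fun m => ((PySem.Dict.mk ((PySem.Dict.mk ((PySem.Dict.mk data).getD year [])).getD m [])).getD habit_name []).sum)
    pvMonths 0 [] (List.replicate 12 0) rfl (by decide)
  simp only [List.nil_append, Nat.cast_zero] at hA
  simp only [habit_days_count_year, habit_days_count_year_alt]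
  rw [hA, hB]
  rw [show pvMonths.zip (List.replicate 12 (0 : Int)) = pvMonths.map (fun m => (m, (0 : Int))) from rfl,
      List.map_map]
  exact List.map_congr_left (fun m _ => pointwise _ habit_name m)
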